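-- pv_equiv track=rewrite | github.com/Rduanchen/NTUTProgramingCourse | 020_PasswordStrength.py | isDigitalContinues
-- ===== SOURCE A (Python) =====
-- def isDigitalContinues(password):
--     digit_positions = [i for i, c in enumerate(password) if c.isdigit()]
--     if len(digit_positions) >= 5:
--         for i in range(len(digit_positions) - 1):
--             if digit_positions[i] + 1 == digit_positions[i + 1]:
--                 return 0
--         return 10
--     return 0
-- ===== SOURCE B (Python) =====
-- def isDigitalContinues(password):
--     count = 0
--     prev = -2
--     adjacent = False
--     for i, c in enumerate(password):
--         if c.isdigit():
--             count += 1
--             if prev + 1 == i: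
--                 adjacent = True
--             prev = i
--     return 10 if count >= 5 and not adjacent else 0
-- ===== Notes on version B (the rewrite author's own statement) =====
-- stated objective: simpler
-- what changed: Single pass keeping only a digit count, the previous digit index and an adjacency flag, instead of materialising the list of digit positions and re-scanning it with indexed pair comparisons.
import Mathlib
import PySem

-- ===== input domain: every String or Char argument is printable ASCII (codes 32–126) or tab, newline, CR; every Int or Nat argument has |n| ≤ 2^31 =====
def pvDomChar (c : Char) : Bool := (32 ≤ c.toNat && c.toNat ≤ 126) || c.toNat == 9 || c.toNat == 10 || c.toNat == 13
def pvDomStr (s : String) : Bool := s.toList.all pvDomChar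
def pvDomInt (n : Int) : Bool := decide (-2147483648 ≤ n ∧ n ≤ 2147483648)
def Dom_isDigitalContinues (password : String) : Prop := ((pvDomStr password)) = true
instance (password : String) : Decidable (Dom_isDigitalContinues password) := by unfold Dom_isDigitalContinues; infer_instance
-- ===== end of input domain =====

-- B replaces A's digit-position list plus indexed re-scan by a single O(1)-space pass
-- keeping a count, the previous digit index and an adjacency flag (objective: simpler).


-- ===== PORT A =====
-- A's loop 'for i in range(len(dp)-1): if dp[i] + 1 == dp[i+1]: return 0' as the
-- obvious structural recursion over consecutive pairs of dp
def pvPairCheck : List Int → Bool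
  | x :: y :: r => if x + 1 == y then true else pvPairCheck (y :: r)
  | _ => false

def isDigitalContinues (password : String) : Int :=
  let dp := ((PySem.List.enumerate password.toList 0).filter
      (fun p => PySem.Chars.isdigit p.2)).map (·.1)
  if 5 ≤ dp.length then (if pvPairCheck dp then 0 else 10) else 0

-- ===== PORT B =====
-- B's single loop: state (count, prev, adjacent)
def pvScan : List (Int × Char) → Int × Int × Bool → Int × Int × Bool
  | [], st => st
  | (i, c) :: rest, (count, prev, adj) =>
    if PySem.Chars.isdigit c then
      pvScan rest (count + 1, i, adj || (prev + 1 == i))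
    else
      pvScan rest (count, prev, adj)

def isDigitalContinues_alt (password : String) : Int :=
  let st := pvScan (PySem.List.enumerate password.toList 0) (0, -2, false)
  if 5 ≤ st.1 ∧ st.2.2 = false then 10 else 0

-- ===== PRECONDITION & SPEC =====
def Spec_isDigitalContinues (password : String) (out : Int) : Prop := out = isDigitalContinues_alt password
instance (password : String) (out : Int) : Decidable (Spec_isDigitalContinues password out) := by unfold Spec_isDigitalContinues; infer_instance

-- ===== CLAIM (what is proved, stated in full; the proofs are below) =====
def Claim_equal_isDigitalContinues : Prop := ∀ (password : String), Dom_isDigitalContinues password → Spec_isDigitalContinues password (isDigitalContinues password)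

-- ===== LEMMAS AND PROOFS =====

-- adjacency of consecutive elements with an explicit "previous" seed
def pvHasAdj : Int → List Int → Bool
  | _, [] => false
  | p, x :: xs => (p + 1 == x) || pvHasAdj x xs

-- digit positions of cs when enumeration starts at s
def pvPos (s : Int) (cs : List Char) : List Int :=
  ((PySem.List.enumerate cs s).filter (fun p => PySem.Chars.isdigit p.2)).map (·.1)

theorem pvPos_nil (s : Int) : pvPos s [] = [] := by
  simp [pvPos, PySem.List.enumerate_nil]

theorem pvPos_cons (s : Int) (c : Char) (cs : List Char) :
    pvPos s (c :: cs) =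
      if PySem.Chars.isdigit c then s :: pvPos (s + 1) cs else pvPos (s + 1) cs := by
  simp [pvPos, PySem.List.enumerate_cons, List.filter]
  split <;> simp_all

theorem pvPos_nonneg (cs : List Char) (s : Int) (hs : 0 ≤ s) :
    ∀ x ∈ pvPos s cs, 0 ≤ x := by
  induction cs generalizing s with
  | nil => simp [pvPos_nil]
  | cons c cs ih =>
    intro x hx
    rw [pvPos_cons] at hx
    split at hx
    · rcases List.mem_cons.mp hx with h | h
      · omega
      · exact ih (s + 1) (by omega) x h
    · exact ih (s + 1) (by omega) x hx

theorem pvScan_spec (cs : List Char) (s count prev : Int) (adj : Bool) :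
    pvScan (PySem.List.enumerate cs s) (count, prev, adj) =
      ((count + (pvPos s cs).length : Int),
       (pvScan (PySem.List.enumerate cs s) (count, prev, adj)).2.1,
       adj || pvHasAdj prev (pvPos s cs)) := by
  induction cs generalizing s count prev adj with
  | nil => simp [PySem.List.enumerate_nil, pvScan, pvPos_nil, pvHasAdj]
  | cons c cs ih =>
    rw [PySem.List.enumerate_cons, pvPos_cons]
    by_cases hd : PySem.Chars.isdigit c
    · simp only [pvScan, hd, if_pos, List.length_cons]
      rw [ih]
      simp [pvHasAdj, Bool.or_assoc]
      omega
    · simp only [pvScan, hd, if_neg, Bool.false_eq_true, not_false_iff]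
      rw [ih]

theorem pvHasAdj_link (r : List Int) (x y : Int) :
    pvHasAdj x (y :: r) = pvPairCheck (x :: y :: r) := by
  induction r generalizing x y with
  | nil => by_cases h : x + 1 = y <;> simp [pvHasAdj, pvPairCheck, h]
  | cons z r ih =>
    simp only [pvHasAdj]
    rw [show ((y + 1 == z) || pvHasAdj z r) = pvHasAdj y (z :: r) from rfl, ih]
    by_cases h : x + 1 = y <;> simp [pvPairCheck, h]

theorem pvHasAdj_seed (l : List Int) (hnn : ∀ x ∈ l, 0 ≤ x) :
    pvHasAdj (-2) l = pvPairCheck l := by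
  match l with
  | [] => simp [pvHasAdj, pvPairCheck]
  | [x] =>
    have hx : 0 ≤ x := hnn x (by simp)
    simp [pvHasAdj, pvPairCheck]
    omega
  | x :: y :: r =>
    have hx : 0 ≤ x := hnn x (by simp)
    simp only [pvHasAdj]
    rw [show ((x + 1 == y) || pvHasAdj y r) = pvHasAdj x (y :: r) from rfl, pvHasAdj_link]
    have : ((-2 : Int) + 1 == x) = false := by
      simp; omega
    rw [this, Bool.false_or]

-- ===== VERDICT (by name: the statement is the Claim_ definition above) =====
theorem isDigitalContinues_spec : Claim_equal_isDigitalContinues := by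
  intro password _
  unfold Spec_isDigitalContinues isDigitalContinues isDigitalContinues_alt
  rw [pvScan_spec]
  have hpos := pvPos_nonneg password.toList 0 le_rfl
  rw [show ((PySem.List.enumerate password.toList 0).filter
      (fun p => PySem.Chars.isdigit p.2)).map (·.1) = pvPos 0 password.toList from rfl]
  rw [pvHasAdj_seed _ hpos]
  simp only [Bool.false_or, Int.zero_add]
  by_cases h5 : 5 ≤ (pvPos 0 password.toList).length
  · by_cases hp : pvPairCheck (pvPos 0 password.toList) <;>
      simp [h5, hp]
  · have : ¬ (5 : Int) ≤ ((pvPos 0 password.toList).length : Int) := by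
      omega
    simp [h5, this]
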